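-- pv_equiv track=rewrite | github.com/JeanCarlosSantacruz/python-projects | tarea6.py | traducir
-- ===== SOURCE A (Python) =====
-- def traducir(d,frase):
--     f= ""
--     for palabra in frase:
--         if palabra in d:
--             f+= (d[palabra])
--             f+= " "
--         else:
--             f= "impossible"
--             return f
--     return f
-- ===== SOURCE B (Python) =====
-- def traducir(d, frase):
--     if all(p in d for p in frase):
--         return "".join(d[p] + " " for p in frase)
--     return "impossible"
-- ===== Notes on version B (the rewrite author's own statement) =====
-- stated objective: idiomatic
-- what changed: Replaces the single interleaved lookup-and-build loop with early return by a validation pass (all membership check) followed by a separate construction pass (join over a mapped comprehension).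
import Mathlib
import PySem

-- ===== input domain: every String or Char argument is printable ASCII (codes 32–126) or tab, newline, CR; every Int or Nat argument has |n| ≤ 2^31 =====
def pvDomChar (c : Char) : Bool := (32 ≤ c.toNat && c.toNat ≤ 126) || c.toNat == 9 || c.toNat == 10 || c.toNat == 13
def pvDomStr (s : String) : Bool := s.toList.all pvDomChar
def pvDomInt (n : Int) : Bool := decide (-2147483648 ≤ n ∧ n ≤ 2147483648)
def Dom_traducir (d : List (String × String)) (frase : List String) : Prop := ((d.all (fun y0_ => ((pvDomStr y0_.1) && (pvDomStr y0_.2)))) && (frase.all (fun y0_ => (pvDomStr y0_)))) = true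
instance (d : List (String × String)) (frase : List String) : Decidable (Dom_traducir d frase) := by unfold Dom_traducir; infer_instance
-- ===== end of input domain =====

-- B replaces A's interleaved lookup-and-build loop (with early return) by a
-- validation pass followed by a separate construction pass (idiomatic).

-- ===== PORT A =====
-- the accumulating loop of A: f grows word by word, early return on a missing key
def traducirGoA (dd : PySem.Dict String String) (f : String) : List String → String
  | [] => f
  | p :: rest =>
    match PySem.Dict.get? dd p with
    | some v => traducirGoA dd (f ++ v ++ " ") rest
    | none => "impossible"

def traducir (d : List (String × String)) (frase : List String) : String :=
  traducirGoA (PySem.Dict.ofList d) "" frase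

-- ===== PORT B =====
def traducir_alt (d : List (String × String)) (frase : List String) : String :=
  let dd := PySem.Dict.ofList d
  if frase.all (fun p => PySem.Dict.contains dd p) then
    String.join (frase.map (fun p => PySem.Dict.getD dd p "" ++ " "))
  else "impossible"

-- ===== PRECONDITION & SPEC =====
def Spec_traducir (d : List (String × String)) (frase : List String) (out : String) : Prop := out = traducir_alt d frase
instance (d : List (String × String)) (frase : List String) (out : String) : Decidable (Spec_traducir d frase out) := by unfold Spec_traducir; infer_instance

-- ===== CLAIM (what is proved, stated in full; the proofs are below) =====
def Claim_equal_traducir : Prop := ∀ (d : List (String × String)) (frase : List String), Dom_traducir d frase → Spec_traducir d frase (traducir d frase)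

-- ===== LEMMAS AND PROOFS =====
theorem foldl_str_append (l : List String) : ∀ a b : String,
    List.foldl (fun r s => r ++ s) (a ++ b) l = a ++ List.foldl (fun r s => r ++ s) b l := by
  induction l with
  | nil => intro a b; rfl
  | cons x xs ih =>
    intro a b
    simp only [List.foldl_cons, String.append_assoc]
    exact ih a (b ++ x)

theorem join_cons (s : String) (l : List String) :
    String.join (s :: l) = s ++ String.join l := by
  simp only [String.join, List.foldl_cons]
  have h := foldl_str_append l s ""
  simpa using h

theorem traducirGoA_eq (dd : PySem.Dict String String) (frase : List String) :
    ∀ f : String, traducirGoA dd f frase =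
      if frase.all (fun p => PySem.Dict.contains dd p) then
        f ++ String.join (frase.map (fun p => PySem.Dict.getD dd p "" ++ " "))
      else "impossible" := by
  induction frase with
  | nil => intro f; simp [traducirGoA, String.join]
  | cons p rest ih =>
    intro f
    simp only [traducirGoA, List.all_cons, List.map_cons]
    rw [PySem.Dict.contains_eq_isSome_get?]
    cases h : PySem.Dict.get? dd p with
    | none => simp
    | some v =>
      dsimp only
      rw [ih, join_cons]
      simp [PySem.Dict.getD_eq_get?_getD, h, String.append_assoc]

theorem traducir_spec : Claim_equal_traducir := by
  intro d frase _
  unfold Spec_traducir traducir traducir_alt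
  rw [traducirGoA_eq]
  simp
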